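-- pv_equiv track=rewrite | github.com/Scienox/NetworkGame | ip_utils/helpfunction.py | get_requiermentIpv4InfoForHost
-- ===== SOURCE A (Python) =====
-- def get_requiermentIpv4InfoForHost(hostNeeded, target=30):
--     totalHost = (2**(32 - target)) - 2
--     if hostNeeded <= totalHost:
--         return totalHost, target
--     elif target < 1:
--         raise ValueError("Hosts possible exceded")
--     else:
--         return get_requiermentIpv4InfoForHost(hostNeeded, target-1)
-- ===== SOURCE B (Python) =====
-- def get_requiermentIpv4InfoForHost(hostNeeded, target=30):
--     # Closed form: the prefix is the larger of (32 - target) and the minimal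
--     # exponent e with 2**e - 2 >= hostNeeded, found via bit_length.
--     e0 = 32 - target
--     m = hostNeeded + 2
--     eneed = (m - 1).bit_length() if m >= 2 else 0
--     e = max(e0, eneed)
--     return (2 ** e) - 2, 32 - e
-- ===== Notes on version B (the rewrite author's own statement) =====
-- stated objective: faster
-- what changed: Replaced A's downward-counting recursion (decrement target until the subnet fits) with a closed-form computation: the prefix exponent is the max of (32 - target) and the bit_length of hostNeeded+1, no loop or recursion.
-- outside the precondition, e.g. on get_requiermentIpv4InfoForHost(-5, 40): A returns (-1.99609375, 40), B returns (-1, 32)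
import Mathlib
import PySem

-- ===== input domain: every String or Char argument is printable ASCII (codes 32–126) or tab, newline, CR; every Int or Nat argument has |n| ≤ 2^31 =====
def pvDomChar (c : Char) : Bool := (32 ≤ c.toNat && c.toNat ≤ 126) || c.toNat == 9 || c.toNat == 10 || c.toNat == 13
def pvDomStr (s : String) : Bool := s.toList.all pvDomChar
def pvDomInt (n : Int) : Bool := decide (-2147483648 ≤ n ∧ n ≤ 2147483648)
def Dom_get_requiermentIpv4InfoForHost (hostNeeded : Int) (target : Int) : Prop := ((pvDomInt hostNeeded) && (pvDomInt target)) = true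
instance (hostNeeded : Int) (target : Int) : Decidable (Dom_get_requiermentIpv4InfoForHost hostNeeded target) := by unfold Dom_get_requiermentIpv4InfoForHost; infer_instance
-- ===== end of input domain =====

-- B replaces A's downward-counting recursion by a closed form (bit_length); equivalence is claimed on target ≤ 32,
-- where Python's 2**(32-target) is an int (see Pre_ below).

-- ===== PORT A =====
-- Literal port of A's recursion. Python's 2**(32-target) is a float when target > 32 (excluded by Pre_);
-- the port is exact on target ≤ 32, where the exponent is a nonnegative int. The 'raise ValueError' branch
-- returns the dummy (0, 0): it is unreachable for |hostNeeded| ≤ 2^31 (at target = 0 everything fits).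
def get_requiermentIpv4InfoForHost (hostNeeded : Int) (target : Int) : Int × Int :=
  let totalHost : Int := 2 ^ (32 - target).toNat - 2
  if hostNeeded ≤ totalHost then (totalHost, target)
  else if target < 1 then (0, 0)  -- raise ValueError("Hosts possible exceded"); unreachable inside Dom ∧ Pre_
  else get_requiermentIpv4InfoForHost hostNeeded (target - 1)
termination_by target.toNat
decreasing_by omega

-- ===== PORT B =====
-- int.bit_length for nonnegative n (B only calls it on n ≥ 1)
def pvBitLength (n : Nat) : Nat := if n = 0 then 0 else Nat.log2 n + 1

def get_requiermentIpv4InfoForHost_alt (hostNeeded : Int) (target : Int) : Int × Int :=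
  let e0 : Int := 32 - target
  let m : Int := hostNeeded + 2
  let eneed : Int := if 2 ≤ m then pvBitLength (m - 1).toNat else 0
  let e : Int := max e0 eneed
  (2 ^ e.toNat - 2, 32 - e)

-- ===== PRECONDITION & SPEC =====
-- Pre_ excludes target > 32, where Python's 2**(32-target) is a float: there A either returns a float tuple
-- (not a value of the declared int×int type) or recurses through float comparisons down to 32 and can hit
-- Python's recursion limit (RecursionError) for large target.
def Pre_get_requiermentIpv4InfoForHost (_hostNeeded : Int) (target : Int) : Prop := target ≤ 32
instance (hostNeeded : Int) (target : Int) : Decidable (Pre_get_requiermentIpv4InfoForHost hostNeeded target) := by unfold Pre_get_requiermentIpv4InfoForHost; infer_instance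

def pvWitness_get_requiermentIpv4InfoForHost : Int × Int := (100, 30)

def Spec_get_requiermentIpv4InfoForHost (hostNeeded : Int) (target : Int) (out : Int × Int) : Prop := out = get_requiermentIpv4InfoForHost_alt hostNeeded target
instance (hostNeeded : Int) (target : Int) (out : Int × Int) : Decidable (Spec_get_requiermentIpv4InfoForHost hostNeeded target out) := by unfold Spec_get_requiermentIpv4InfoForHost; infer_instance

-- ===== CLAIM (what is proved, stated in full; the proofs are below) =====
def Claim_equal_get_requiermentIpv4InfoForHost : Prop := ∀ (hostNeeded : Int) (target : Int), Dom_get_requiermentIpv4InfoForHost hostNeeded target → Pre_get_requiermentIpv4InfoForHost hostNeeded target → Spec_get_requiermentIpv4InfoForHost hostNeeded target (get_requiermentIpv4InfoForHost hostNeeded target)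

-- ===== LEMMAS AND PROOFS =====

-- eneed as a pure function of hostNeeded, for reasoning
def pvEneed (hostNeeded : Int) : Int :=
  if 2 ≤ hostNeeded + 2 then pvBitLength (hostNeeded + 1).toNat else 0

lemma alt_eq (h t : Int) :
    get_requiermentIpv4InfoForHost_alt h t
      = (2 ^ (max (32 - t) (pvEneed h)).toNat - 2, 32 - max (32 - t) (pvEneed h)) := by
  unfold get_requiermentIpv4InfoForHost_alt pvEneed
  have : h + 2 - 1 = h + 1 := by ring
  simp [this]

-- minimality, half 1: if hostNeeded fits in exponent k then eneed ≤ k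
lemma pvEneed_le {h : Int} {k : Nat} (fits : h ≤ 2 ^ k - 2) : pvEneed h ≤ (k : Int) := by
  have hc : ((2 ^ k : Nat) : Int) = 2 ^ k := by push_cast; ring
  have h1 : 1 ≤ 2 ^ k := Nat.one_le_two_pow
  unfold pvEneed
  split
  · rename_i hm
    unfold pvBitLength
    split
    · omega
    · rename_i hnz
      have hlt : (h + 1).toNat < 2 ^ k := by omega
      have := (Nat.log2_lt hnz).mpr hlt
      omega
  · omega

-- minimality, half 2: if hostNeeded does not fit in exponent k then eneed > k
lemma lt_pvEneed {h : Int} {k : Nat} (nofit : ¬ h ≤ 2 ^ k - 2) : (k : Int) < pvEneed h := by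
  have hc : ((2 ^ k : Nat) : Int) = 2 ^ k := by push_cast; ring
  have h1 : 1 ≤ 2 ^ k := Nat.one_le_two_pow
  unfold pvEneed
  have hm : 2 ≤ h + 2 := by omega
  rw [if_pos hm]
  unfold pvBitLength
  have hle : 2 ^ k ≤ (h + 1).toNat := by omega
  have hnz : (h + 1).toNat ≠ 0 := by omega
  rw [if_neg hnz]
  have := (Nat.le_log2 hnz).mpr hle
  omega

-- the "fits" case: A returns immediately and the closed form picks e = 32 - t
lemma fits_case (h t : Int) (ht32 : t ≤ 32)
    (fits : h ≤ 2 ^ (32 - t).toNat - 2) :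
    get_requiermentIpv4InfoForHost h t = get_requiermentIpv4InfoForHost_alt h t := by
  rw [get_requiermentIpv4InfoForHost, alt_eq, if_pos fits]
  have hk : ((32 - t).toNat : Int) = 32 - t := by omega
  have hle : pvEneed h ≤ 32 - t := by
    have := pvEneed_le fits; omega
  have hmax : max (32 - t) (pvEneed h) = 32 - t := max_eq_left hle
  rw [hmax]
  simp only [Prod.mk.injEq]
  exact ⟨trivial, by omega⟩

-- inside the domain, at t ≤ 0 everything fits
lemma base_fits (h t : Int) (hd : h ≤ 2147483648) (ht : t ≤ 0) :
    h ≤ 2 ^ (32 - t).toNat - 2 := by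
  have hk : 32 ≤ (32 - t).toNat := by omega
  have h32 : (2 : Int) ^ (32 : Nat) ≤ 2 ^ (32 - t).toNat :=
    pow_le_pow_right₀ (by norm_num) hk
  norm_num at h32 ⊢
  omega

-- main induction: A equals the closed form for all target ≤ 32 in the domain
lemma main_eq (h : Int) (hd : h ≤ 2147483648) :
    ∀ (n : Nat) (t : Int), t.toNat ≤ n → t ≤ 32 →
      get_requiermentIpv4InfoForHost h t = get_requiermentIpv4InfoForHost_alt h t := by
  intro n
  induction n with
  | zero =>
    intro t htn ht32
    exact fits_case h t ht32 (base_fits h t hd (by omega))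
  | succ n ih =>
  intro t htn ht32
  by_cases fits : h ≤ 2 ^ (32 - t).toNat - 2
  · exact fits_case h t ht32 fits
  · rw [get_requiermentIpv4InfoForHost, if_neg fits]
    -- at t ≤ 0 everything in the domain fits: contradiction
    have ht1 : ¬ t < 1 := fun hlt => fits (base_fits h t hd (by omega))
    rw [if_neg ht1]
    -- the closed form is stable under decrementing t while it does not fit
    have hgt : (32 - t) < pvEneed h := by
      have := lt_pvEneed fits
      omega
    have e1 : max (32 - t) (pvEneed h) = pvEneed h := max_eq_right (le_of_lt hgt)
    have e2 : max (32 - (t - 1)) (pvEneed h) = pvEneed h := max_eq_right (by omega)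
    rw [ih (t - 1) (by omega) (by omega), alt_eq, alt_eq, e1, e2]

-- ===== VERDICT (by name: the statement is the Claim_ definition above) =====
theorem get_requiermentIpv4InfoForHost_spec : Claim_equal_get_requiermentIpv4InfoForHost := by
  intro h t hdom hpre
  unfold Spec_get_requiermentIpv4InfoForHost
  have hd : h ≤ 2147483648 := by
    unfold Dom_get_requiermentIpv4InfoForHost pvDomInt at hdom
    simp at hdom
    exact_mod_cast hdom.1.2
  exact main_eq h hd (t.toNat) t le_rfl hpre
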